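-- pv_equiv track=rewrite | github.com/Pritz69/GFG_POTD | Medium/Sequence of Sequence/sequence-of-sequence.py | numberSequence
-- ===== SOURCE A (Python) =====
-- def numberSequence(m, n):
--     # code here
--     if n==1 :
--         return m
--     def rec(i,v) :
--         if i==n :
--             if v <= m :
--                 return 1
--             return 0
--         if v > m :
--             return 0
--         if (i,v) in dp :
--             return dp[(i,v)]
--         tk=0
--         for j in range(v*2,m+1) :
--             tk=tk+rec(i+1,j)
--         dp[(i,v)]=tk
--         return dp[(i,v)]
--     dp={}
--     ans=0
--     for i in range(1,m//2 +1):
--         ans += rec(1,i)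
--     return ans
-- ===== SOURCE B (Python) =====
-- def numberSequence(m, n):
--     # Layered DP with a suffix-sum pass instead of memoized recursion with an inner summation loop.
--     if n == 1:
--         return m
--     if n < 1 or m < 2:
--         return 0
--     cur = [1] * (m + 1)          # cur[v] = number of ways to go 0 more steps from last term v
--     for _ in range(n - 1):
--         if not any(cur):
--             break                # all further layers stay zero
--         # suf[j] = cur[j] + cur[j+1] + ... + cur[m]
--         s = 0
--         acc = [0]
--         for x in reversed(cur):
--             s += x
--             acc.append(s)
--         acc.reverse()
--         suf = acc
--         cur = [suf[2 * v] if 1 <= v and 2 * v <= m else 0 for v in range(m + 1)]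
--     return sum(cur[1 : m // 2 + 1])
-- ===== Notes on version B (the rewrite author's own statement) =====
-- stated objective: faster
-- what changed: Replaces A's memoized top-down recursion (whose inner loop sums O(m) recursive values per state) by a bottom-up layered DP whose inner summation is eliminated with a single suffix-sum pass per layer, stopping early once a layer is all zero.
import Mathlib
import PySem

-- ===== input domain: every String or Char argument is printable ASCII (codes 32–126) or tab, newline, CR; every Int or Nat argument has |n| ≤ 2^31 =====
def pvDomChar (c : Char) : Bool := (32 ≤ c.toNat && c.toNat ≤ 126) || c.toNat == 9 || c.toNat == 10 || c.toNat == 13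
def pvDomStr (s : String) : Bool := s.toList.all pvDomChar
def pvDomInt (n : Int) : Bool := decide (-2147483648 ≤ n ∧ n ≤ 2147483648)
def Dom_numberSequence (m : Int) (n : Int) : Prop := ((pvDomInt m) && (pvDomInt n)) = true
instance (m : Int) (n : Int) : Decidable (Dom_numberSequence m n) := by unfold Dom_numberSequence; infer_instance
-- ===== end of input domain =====

-- B replaces A's memoized recursion (inner O(m) summation per state) by a layered DP with one
-- suffix-sum pass per layer and an early exit on an all-zero layer: objective 'faster'.

-- ===== PORT A =====
-- rec(i, v) with the memo dict dp threaded through; fuel only guards totality (the chosen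
-- value m.natAbs + n.natAbs + 2 is never exhausted on the calls A makes, proved below).
def recA (m n : Int) : Nat → Int → Int → PySem.Dict (Int × Int) Int → Int × PySem.Dict (Int × Int) Int
  | 0, _, _, dp => (0, dp)
  | fuel+1, i, v, dp =>
    if i = n then (if v ≤ m then (1 : Int) else 0, dp)
    else if v > m then (0, dp)
    else
      match dp.get? (i, v) with
      | some t => (t, dp)
      | none =>
        let r := (PySem.List.pyRange (v * 2) (m + 1) 1).foldl
          (fun (acc : Int × PySem.Dict (Int × Int) Int) j =>
            let p := recA m n fuel (i + 1) j acc.2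
            (acc.1 + p.1, p.2)) (0, dp)
        (r.1, r.2.insert (i, v) r.1)

def numberSequence (m : Int) (n : Int) : Int :=
  if n = 1 then m
  else
    ((PySem.List.pyRange 1 (PySem.Int.floordiv m 2 + 1) 1).foldl
      (fun (acc : Int × PySem.Dict (Int × Int) Int) i =>
        let p := recA m n (m.natAbs + n.natAbs + 2) 1 i acc.2
        (acc.1 + p.1, p.2)) (0, PySem.Dict.empty)).1

-- ===== PORT B =====
-- reversed(cur) pass accumulating the running sum s and appending to acc, then reverse: suffix sums.
def sufB (cur : List Int) : List Int :=
  ((cur.reverse.foldl (fun (p : Int × List Int) x => (p.1 + x, p.2 ++ [p.1 + x])) (0, [0])).2).reverse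

def stepB (m : Int) (cur : List Int) : List Int :=
  let suf := sufB cur
  (PySem.List.pyRange 0 (m + 1) 1).map
    (fun v => if 1 ≤ v ∧ 2 * v ≤ m then PySem.List.pyGetD suf (2 * v) 0 else 0)

-- 'for _ in range(n-1): if not any(cur): break; cur = step(cur)'
def loopB (m : Int) : Nat → List Int → List Int
  | 0, cur => cur
  | t+1, cur => if cur.all (fun x => x == 0) then cur else loopB m t (stepB m cur)

def numberSequence_alt (m : Int) (n : Int) : Int :=
  if n = 1 then m
  else if n < 1 ∨ m < 2 then 0
  else
    (PySem.List.slice (loopB m (n - 1).toNat (List.replicate (m + 1).toNat 1))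
      (some 1) (some (PySem.Int.floordiv m 2 + 1))).sum

-- ===== PRECONDITION & SPEC =====
def Spec_numberSequence (m : Int) (n : Int) (out : Int) : Prop := out = numberSequence_alt m n
instance (m : Int) (n : Int) (out : Int) : Decidable (Spec_numberSequence m n out) := by unfold Spec_numberSequence; infer_instance

-- ===== CLAIM (what is proved, stated in full; the proofs are below) =====
def Claim_equal_numberSequence : Prop := ∀ (m : Int) (n : Int), Dom_numberSequence m n → Spec_numberSequence m n (numberSequence m n)

-- ===== LEMMAS AND PROOFS =====

-- The common value: Rv m t v = number of ways to extend a sequence ending in v by t more terms.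
def Rv (m : Int) : Nat → Int → Int
  | 0, v => if v ≤ m then 1 else 0
  | t+1, v =>
    if v > m then 0
    else (PySem.List.pyRange (v * 2) (m + 1) 1).foldl (fun acc j => acc + Rv m t j) 0

-- memo-dict invariant for the n ≥ i case
def InvR (m n : Int) (dp : PySem.Dict (Int × Int) Int) : Prop :=
  ∀ k t, dp.get? k = some t → t = Rv m (n - k.1).toNat k.2

-- memo-dict invariant for the i > n (n ≤ 0) case
def Inv0 (dp : PySem.Dict (Int × Int) Int) : Prop :=
  ∀ k t, dp.get? k = some t → t = 0

theorem invR_empty (m n : Int) : InvR m n PySem.Dict.empty := by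
  intro k t h; simp [PySem.Dict.get?_empty] at h

theorem inv0_empty : Inv0 PySem.Dict.empty := by
  intro k t h; simp [PySem.Dict.get?_empty] at h

-- A's rec computes Rv when i ≤ n (fuel bounded below by n - i).
theorem recA_eq (m n : Int) : ∀ fuel (i v : Int) dp, InvR m n dp → i ≤ n → (n - i).toNat < fuel →
    (recA m n fuel i v dp).1 = Rv m (n - i).toNat v ∧ InvR m n (recA m n fuel i v dp).2 := by
  intro fuel
  induction fuel with
  | zero => intro i v dp _ _ h; omega
  | succ fuel IH =>
    intro i v dp hInv hin hfuel
    by_cases hi : i = n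
    · have h0 : (n - i).toNat = 0 := by omega
      simp only [recA, if_pos hi, h0]
      exact ⟨by simp [Rv], hInv⟩
    · have hlt : i < n := lt_of_le_of_ne hin hi
      have ht : (n - i).toNat = (n - (i + 1)).toNat + 1 := by omega
      by_cases hv : v > m
      · simp only [recA, if_neg hi, if_pos hv]
        exact ⟨by rw [ht]; simp [Rv, hv], hInv⟩
      · have hin' : i + 1 ≤ n := by omega
        have hfuel' : (n - (i + 1)).toNat < fuel := by omega
        have fold : ∀ (l : List Int) (a : Int) (d : PySem.Dict (Int × Int) Int), InvR m n d →
            (l.foldl (fun (acc : Int × PySem.Dict (Int × Int) Int) j =>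
                let p := recA m n fuel (i + 1) j acc.2
                (acc.1 + p.1, p.2)) (a, d)).1
              = a + (l.map (Rv m (n - (i + 1)).toNat)).sum
            ∧ InvR m n (l.foldl (fun (acc : Int × PySem.Dict (Int × Int) Int) j =>
                let p := recA m n fuel (i + 1) j acc.2
                (acc.1 + p.1, p.2)) (a, d)).2 := by
          intro l
          induction l with
          | nil => intro a d hd; exact ⟨by simp, hd⟩
          | cons x xs ihl =>
            intro a d hd
            obtain ⟨h1, h2⟩ := IH (i + 1) x d hd hin' hfuel'
            simp only [List.foldl_cons]
            obtain ⟨h3, h4⟩ := ihl (a + (recA m n fuel (i + 1) x d).1) (recA m n fuel (i + 1) x d).2 h2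
            refine ⟨?_, h4⟩
            rw [h3, h1]
            simp [add_assoc]
        cases hdp : dp.get? (i, v) with
        | some t =>
          simp only [recA, if_neg hi, if_neg hv, hdp]
          exact ⟨hInv (i, v) t hdp, hInv⟩
        | none =>
          simp only [recA, if_neg hi, if_neg hv, hdp]
          obtain ⟨h1, h2⟩ := fold (PySem.List.pyRange (v * 2) (m + 1) 1) 0 dp hInv
          have hval : (Rv m (n - i).toNat v)
              = 0 + ((PySem.List.pyRange (v * 2) (m + 1) 1).map (Rv m (n - (i + 1)).toNat)).sum := by
            rw [ht]
            simp only [Rv, if_neg hv]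
            rw [PySem.List.foldl_add]
          refine ⟨by rw [h1, hval], ?_⟩
          intro k t hk
          rw [PySem.Dict.get?_insert] at hk
          by_cases hkey : k = (i, v)
          · rw [if_pos hkey] at hk
            cases hk
            subst hkey
            rw [h1, hval]
          · rw [if_neg hkey] at hk
            exact h2 k t hk

-- A's rec returns 0 when n < i and 1 ≤ v (fuel bounded below by m + 1 - v).
theorem recA_zero (m n : Int) : ∀ fuel (i v : Int) dp, Inv0 dp → n < i → 1 ≤ v → (m + 1 - v).toNat < fuel →
    (recA m n fuel i v dp).1 = 0 ∧ Inv0 (recA m n fuel i v dp).2 := by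
  intro fuel
  induction fuel with
  | zero => intro i v dp _ _ _ h; omega
  | succ fuel IH =>
    intro i v dp hInv hni hv1 hfuel
    have hi : ¬ i = n := by omega
    by_cases hv : v > m
    · simp only [recA, if_neg hi, if_pos hv]
      exact ⟨by trivial, hInv⟩
    · have fold : ∀ (l : List Int) (hl : ∀ j ∈ l, 1 ≤ j ∧ (m + 1 - j).toNat < fuel)
          (a : Int) (d : PySem.Dict (Int × Int) Int), Inv0 d →
          (l.foldl (fun (acc : Int × PySem.Dict (Int × Int) Int) j =>
              let p := recA m n fuel (i + 1) j acc.2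
              (acc.1 + p.1, p.2)) (a, d)).1 = a
          ∧ Inv0 (l.foldl (fun (acc : Int × PySem.Dict (Int × Int) Int) j =>
              let p := recA m n fuel (i + 1) j acc.2
              (acc.1 + p.1, p.2)) (a, d)).2 := by
        intro l
        induction l with
        | nil => intro _ a d hd; exact ⟨by simp, hd⟩
        | cons x xs ihl =>
          intro hl a d hd
          obtain ⟨hx1, hx2⟩ := hl x (by simp)
          obtain ⟨h1, h2⟩ := IH (i + 1) x d hd (by omega) hx1 hx2
          simp only [List.foldl_cons]
          obtain ⟨h3, h4⟩ := ihl (fun j hj => hl j (by simp [hj])) (a + (recA m n fuel (i + 1) x d).1) (recA m n fuel (i + 1) x d).2 h2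
          refine ⟨?_, h4⟩
          rw [h3, h1]
          simp
      have hl : ∀ j ∈ PySem.List.pyRange (v * 2) (m + 1) 1, 1 ≤ j ∧ (m + 1 - j).toNat < fuel := by
        intro j hj
        rw [PySem.List.mem_pyRange_one] at hj
        constructor
        · omega
        · omega
      cases hdp : dp.get? (i, v) with
      | some t =>
        simp only [recA, if_neg hi, if_neg hv, hdp]
        exact ⟨hInv (i, v) t hdp, hInv⟩
      | none =>
        simp only [recA, if_neg hi, if_neg hv, hdp]
        obtain ⟨h1, h2⟩ := fold (PySem.List.pyRange (v * 2) (m + 1) 1) hl 0 dp hInv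
        refine ⟨h1, ?_⟩
        intro k t hk
        rw [PySem.Dict.get?_insert] at hk
        by_cases hkey : k = (i, v)
        · rw [if_pos hkey] at hk
          cases hk
          exact h1
        · rw [if_neg hkey] at hk
          exact h2 k t hk

-- partial sums offset by s (the values appended by B's reversed-cur loop)
def psums (s : Int) : List Int → List Int
  | [] => []
  | x :: xs => (s + x) :: psums (s + x) xs

theorem foldl_psums : ∀ (l : List Int) (s : Int) (acc : List Int),
    l.foldl (fun (p : Int × List Int) x => (p.1 + x, p.2 ++ [p.1 + x])) (s, acc)
      = (s + l.sum, acc ++ psums s l) := by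
  intro l
  induction l with
  | nil => intro s acc; simp [psums]
  | cons x xs ih =>
    intro s acc
    simp only [List.foldl_cons, psums]
    rw [ih]
    simp [add_assoc]

theorem psums_reverse : ∀ (l : List Int) (s : Int),
    (psums s l).reverse ++ [s] = l.reverse.tails.map (fun t => s + t.sum) := by
  intro l
  induction l with
  | nil => intro s; simp [psums]
  | cons x xs ih =>
    intro s
    simp only [psums, List.reverse_cons, List.tails_append]
    rw [List.map_append]
    have h2 : (List.map (fun t => s + t.sum) (List.map (fun t => t ++ [x]) xs.reverse.tails))
        = List.map (fun t => (s + x) + t.sum) xs.reverse.tails := by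
      rw [List.map_map]
      apply List.map_congr_left
      intro a _
      simp
      ring
    rw [h2, ← ih (s + x)]
    simp

theorem sufB_eq_tails (cur : List Int) : sufB cur = cur.tails.map List.sum := by
  unfold sufB
  rw [foldl_psums]
  show ([0] ++ psums 0 cur.reverse).reverse = _
  rw [List.reverse_append, List.reverse_singleton, psums_reverse cur.reverse 0, List.reverse_reverse]
  apply List.map_congr_left
  intro a _
  simp

-- [f(v) for v in range(a, b)] indexed back: map over pyRange as drop/take of the list it reads
theorem map_pyRange_getD (cur : List Int) (a b : Nat) (_hab : a ≤ b) (h : b ≤ cur.length) :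
    (PySem.List.pyRange (a : Int) (b : Int) 1).map (fun j => PySem.List.pyGetD cur j 0)
      = (cur.drop a).take (b - a) := by
  apply List.ext_getElem
  · simp [PySem.List.length_pyRange_one]
    omega
  · intro k h1 h2
    rw [List.getElem_map, PySem.List.getElem_pyRange_one]
    rw [List.getElem_take, List.getElem_drop]
    have hk : k < (((b : Int)) - (a : Int)).toNat := by
      simpa [PySem.List.length_pyRange_one] using h1
    have hcast : (a : Int) + (k : Int) = ((a + k : Nat) : Int) := by push_cast; ring
    rw [hcast, PySem.List.pyGetD_natCast]
    rw [List.getD_eq_getElem]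

-- layer invariant: cur has length m+1 and cur[j] = Rv m k j for 1 ≤ j ≤ m
def GoodL (m : Int) (k : Nat) (cur : List Int) : Prop :=
  cur.length = (m + 1).toNat ∧ ∀ (j : Nat) (h : j < cur.length), 1 ≤ j → cur[j] = Rv m k (j : Int)

theorem good_replicate (m : Int) (_hm : 0 ≤ m) : GoodL m 0 (List.replicate (m + 1).toNat 1) := by
  refine ⟨by simp, ?_⟩
  intro j h h1
  rw [List.getElem_replicate]
  have : (j : Int) ≤ m := by
    simp at h
    omega
  simp [Rv, this]

theorem step_good (m : Int) (hm : 1 ≤ m) (k : Nat) (cur : List Int) (h : GoodL m k cur) :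
    GoodL m (k + 1) (stepB m cur) := by
  obtain ⟨hlen, hval⟩ := h
  have hlen2 : (stepB m cur).length = (m + 1).toNat := by
    simp [stepB, PySem.List.length_pyRange_one]
  refine ⟨hlen2, ?_⟩
  intro j hj h1
  have hjm : (j : Int) ≤ m := by
    rw [hlen2] at hj
    omega
  have hjlt : j < (PySem.List.pyRange 0 (m + 1) 1).length := by
    simp [PySem.List.length_pyRange_one]
    omega
  rw [show (stepB m cur)[j] = (stepB m cur)[j]'hj from rfl]
  simp only [stepB, List.getElem_map]
  rw [PySem.List.getElem_pyRange_one]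
  simp only [zero_add]
  by_cases hc : 1 ≤ (j : Int) ∧ 2 * (j : Int) ≤ m
  · rw [if_pos hc]
    have hcast : 2 * (j : Int) = ((2 * j : Nat) : Int) := by push_cast; ring
    rw [sufB_eq_tails, hcast, PySem.List.pyGetD_natCast]
    have hb : 2 * j < (cur.tails.map List.sum).length := by
      rw [List.length_map, List.length_tails, hlen]
      omega
    rw [List.getD_eq_getElem _ _ hb, List.getElem_map, List.getElem_tails]
    -- Rv side
    have hvm : ¬ ((j : Int) > m) := by omega
    rw [show Rv m (k + 1) (j : Int)
        = (PySem.List.pyRange ((j : Int) * 2) (m + 1) 1).foldl (fun acc j' => acc + Rv m k j') 0 by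
      simp [Rv, hvm]]
    rw [PySem.List.foldl_add]
    have hmap : (PySem.List.pyRange ((j : Int) * 2) (m + 1) 1).map (Rv m k)
        = (PySem.List.pyRange ((j : Int) * 2) (m + 1) 1).map (fun j' => PySem.List.pyGetD cur j' 0) := by
      apply List.map_congr_left
      intro x hx
      rw [PySem.List.mem_pyRange_one] at hx
      have hx1 : 1 ≤ x := by omega
      have hxlen : x.toNat < cur.length := by
        rw [hlen]
        omega
      have hx0 : (0 : Int) ≤ x := by omega
      rw [PySem.List.pyGetD_eq_getElem cur 0 hx0 (by omega)]
      rw [hval x.toNat hxlen (by omega)]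
      congr 1
      omega
    have hmr : (PySem.List.pyRange ((j : Int) * 2) (m + 1) 1).map (fun j' => PySem.List.pyGetD cur j' 0)
        = (cur.drop (2 * j)).take ((m + 1).toNat - 2 * j) := by
      rw [show ((j : Int) * 2) = ((2 * j : Nat) : Int) by push_cast; ring,
          show (m + 1 : Int) = (((m + 1).toNat : Nat) : Int) by omega]
      exact map_pyRange_getD cur (2 * j) (m + 1).toNat (by omega) (by omega)
    rw [hmap, hmr]
    rw [List.take_of_length_le (by rw [List.length_drop, hlen])]
    simp
  · rw [if_neg hc]
    have h2j : m < 2 * (j : Int) := by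
      rcases not_and_or.mp hc with h' | h'
      · omega
      · omega
    by_cases hvm : (j : Int) > m
    · simp [Rv, hvm]
    · rw [show Rv m (k + 1) (j : Int)
          = (PySem.List.pyRange ((j : Int) * 2) (m + 1) 1).foldl (fun acc j' => acc + Rv m k j') 0 by
        simp [Rv, hvm]]
      rw [PySem.List.pyRange_one_eq_nil (by omega)]
      rfl

-- once a whole layer vanishes on 1..m, all later layers vanish there too
theorem rv_vanish (m : Int) (k : Nat) (h : ∀ v : Int, 1 ≤ v → v ≤ m → Rv m k v = 0) :
    ∀ (d : Nat) (v : Int), 1 ≤ v → v ≤ m → Rv m (k + d) v = 0 := by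
  intro d
  induction d with
  | zero => exact h
  | succ d ih =>
    intro v h1 h2
    have hvm : ¬ (v > m) := by omega
    rw [show k + (d + 1) = (k + d) + 1 by omega]
    rw [show Rv m ((k + d) + 1) v
        = (PySem.List.pyRange (v * 2) (m + 1) 1).foldl (fun acc j' => acc + Rv m (k + d) j') 0 by
      simp [Rv, hvm]]
    rw [PySem.List.foldl_add]
    rw [List.sum_eq_zero]
    · simp
    · intro x hx
      simp only [List.mem_map] at hx
      obtain ⟨j, hj, rfl⟩ := hx
      rw [PySem.List.mem_pyRange_one] at hj
      exact ih j (by omega) (by omega)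

-- the slice B returns, as a sum of Rv over the start range
theorem slice_sum_eq (m : Int) (hm : 1 ≤ m) (k : Nat) (cur : List Int) (h : GoodL m k cur) :
    (PySem.List.slice cur (some 1) (some (PySem.Int.floordiv m 2 + 1))).sum
      = ((PySem.List.pyRange 1 (PySem.Int.floordiv m 2 + 1) 1).map (Rv m k)).sum := by
  obtain ⟨hlen, hval⟩ := h
  have hdiv : PySem.Int.floordiv m 2 = m / 2 := PySem.Int.floordiv_eq_ediv_of_pos (by omega)
  have hb1 : (1 : Int) ≤ PySem.Int.floordiv m 2 + 1 := by omega
  have hble : PySem.Int.floordiv m 2 + 1 ≤ m + 1 := by omega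
  have hcast : PySem.Int.floordiv m 2 + 1 = (((m / 2).toNat + 1 : Nat) : Int) := by omega
  have hslice : PySem.List.slice cur (some 1) (some (PySem.Int.floordiv m 2 + 1))
      = (cur.drop 1).take ((m / 2).toNat + 1 - 1) := by
    rw [hcast, show (1 : Int) = ((1 : Nat) : Int) by simp, PySem.List.slice_natCast]
  rw [hslice, ← map_pyRange_getD cur 1 ((m / 2).toNat + 1) (by omega) (by omega)]
  have hr : PySem.List.pyRange (((1 : Nat)) : Int) ((((m / 2).toNat + 1 : Nat)) : Int) 1
      = PySem.List.pyRange 1 (PySem.Int.floordiv m 2 + 1) 1 := by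
    congr 1
    omega
  rw [hr]
  congr 1
  apply List.map_congr_left
  intro x hx
  rw [PySem.List.mem_pyRange_one] at hx
  rw [hdiv] at hx
  have hx0 : (0 : Int) ≤ x := by omega
  rw [PySem.List.pyGetD_eq_getElem cur 0 hx0 (by omega)]
  rw [hval x.toNat (by omega) (by omega)]
  congr 1
  omega

theorem loop_sum (m : Int) (hm : 1 ≤ m) : ∀ (t k : Nat) (cur : List Int), GoodL m k cur →
    (PySem.List.slice (loopB m t cur) (some 1) (some (PySem.Int.floordiv m 2 + 1))).sum
      = ((PySem.List.pyRange 1 (PySem.Int.floordiv m 2 + 1) 1).map (Rv m (k + t))).sum := by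
  intro t
  induction t with
  | zero => intro k cur h; simpa using slice_sum_eq m hm k cur h
  | succ t ih =>
    intro k cur h
    by_cases hz : cur.all (fun x => x == 0)
    · simp only [loopB, if_pos hz]
      rw [slice_sum_eq m hm k cur h]
      have hzero : ∀ v : Int, 1 ≤ v → v ≤ m → Rv m k v = 0 := by
        intro v h1 h2
        have hvl : v.toNat < cur.length := by
          rw [h.1]
          omega
        have := h.2 v.toNat hvl (by omega)
        rw [List.all_eq_true] at hz
        have hz' := hz (cur[v.toNat]'hvl) (by exact List.getElem_mem hvl)
        rw [show (v.toNat : Int) = v by omega] at this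
        rw [← this]
        simpa using hz'
      have hzero' := rv_vanish m k hzero
      rw [List.sum_eq_zero, List.sum_eq_zero]
      · intro x hx
        simp only [List.mem_map] at hx
        obtain ⟨j, hj, rfl⟩ := hx
        rw [PySem.List.mem_pyRange_one] at hj
        have hdiv : PySem.Int.floordiv m 2 = m / 2 := PySem.Int.floordiv_eq_ediv_of_pos (by omega)
        rw [hdiv] at hj
        exact hzero' (t + 1) j (by omega) (by omega)
      · intro x hx
        simp only [List.mem_map] at hx
        obtain ⟨j, hj, rfl⟩ := hx
        rw [PySem.List.mem_pyRange_one] at hj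
        have hdiv : PySem.Int.floordiv m 2 = m / 2 := PySem.Int.floordiv_eq_ediv_of_pos (by omega)
        rw [hdiv] at hj
        exact hzero j (by omega) (by omega)
    · simp only [loopB, if_neg hz]
      rw [ih (k + 1) (stepB m cur) (step_good m hm k cur h),
        show k + 1 + t = k + (t + 1) by omega]

-- ===== VERDICT (by name: the statement is the Claim_ definition above) =====
theorem numberSequence_spec : Claim_equal_numberSequence := by
  unfold Claim_equal_numberSequence Spec_numberSequence
  intro m n _
  unfold numberSequence numberSequence_alt
  by_cases h1 : n = 1
  · simp [h1]
  · rw [if_neg h1, if_neg h1]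
    by_cases hn : n < 1
    · rw [if_pos (Or.inl hn)]
      have fold : ∀ (l : List Int), (∀ j ∈ l, 1 ≤ j) → ∀ (a : Int) (d : PySem.Dict (Int × Int) Int), Inv0 d →
          (l.foldl (fun (acc : Int × PySem.Dict (Int × Int) Int) i =>
              let p := recA m n (m.natAbs + n.natAbs + 2) 1 i acc.2
              (acc.1 + p.1, p.2)) (a, d)).1 = a
          ∧ Inv0 (l.foldl (fun (acc : Int × PySem.Dict (Int × Int) Int) i =>
              let p := recA m n (m.natAbs + n.natAbs + 2) 1 i acc.2
              (acc.1 + p.1, p.2)) (a, d)).2 := by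
        intro l
        induction l with
        | nil => intro _ a d hd; exact ⟨by simp, hd⟩
        | cons x xs ihl =>
          intro hl a d hd
          obtain ⟨h1', h2'⟩ := recA_zero m n (m.natAbs + n.natAbs + 2) 1 x d hd (by omega)
            (hl x (by simp)) (by have := hl x (by simp); omega)
          simp only [List.foldl_cons]
          obtain ⟨h3, h4⟩ := ihl (fun j hj => hl j (by simp [hj]))
            (a + (recA m n (m.natAbs + n.natAbs + 2) 1 x d).1) (recA m n (m.natAbs + n.natAbs + 2) 1 x d).2 h2'
          refine ⟨?_, h4⟩
          rw [h3, h1']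
          simp
      have hl : ∀ j ∈ PySem.List.pyRange 1 (PySem.Int.floordiv m 2 + 1) 1, 1 ≤ j := by
        intro j hj
        rw [PySem.List.mem_pyRange_one] at hj
        omega
      exact (fold _ hl 0 PySem.Dict.empty inv0_empty).1
    · by_cases hm : m < 2
      · rw [if_pos (Or.inr hm)]
        have hflo : PySem.Int.floordiv m 2 < 1 := by
          rw [PySem.Int.floordiv_lt_iff_lt_mul (by omega)]
          omega
        rw [PySem.List.pyRange_one_eq_nil (by omega)]
        simp
      · rw [if_neg (by omega : ¬ (n < 1 ∨ m < 2))]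
        have hfuel : (n - 1).toNat < m.natAbs + n.natAbs + 2 := by omega
        have fold : ∀ (l : List Int) (a : Int) (d : PySem.Dict (Int × Int) Int), InvR m n d →
            (l.foldl (fun (acc : Int × PySem.Dict (Int × Int) Int) i =>
                let p := recA m n (m.natAbs + n.natAbs + 2) 1 i acc.2
                (acc.1 + p.1, p.2)) (a, d)).1 = a + (l.map (Rv m (n - 1).toNat)).sum
            ∧ InvR m n (l.foldl (fun (acc : Int × PySem.Dict (Int × Int) Int) i =>
                let p := recA m n (m.natAbs + n.natAbs + 2) 1 i acc.2
                (acc.1 + p.1, p.2)) (a, d)).2 := by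
          intro l
          induction l with
          | nil => intro a d hd; exact ⟨by simp, hd⟩
          | cons x xs ihl =>
            intro a d hd
            obtain ⟨h1', h2'⟩ := recA_eq m n (m.natAbs + n.natAbs + 2) 1 x d hd (by omega) hfuel
            simp only [List.foldl_cons]
            obtain ⟨h3, h4⟩ := ihl
              (a + (recA m n (m.natAbs + n.natAbs + 2) 1 x d).1) (recA m n (m.natAbs + n.natAbs + 2) 1 x d).2 h2'
            refine ⟨?_, h4⟩
            rw [h3, h1']
            simp [add_assoc]
        obtain ⟨hA, _⟩ := fold (PySem.List.pyRange 1 (PySem.Int.floordiv m 2 + 1) 1) 0 PySem.Dict.empty (invR_empty m n)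
        rw [hA]
        rw [loop_sum m (by omega) (n - 1).toNat 0 _ (good_replicate m (by omega))]
        simp
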